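-- pv_equiv track=rewrite | github.com/michaelbuzzetta/CS115 | multFive.py | multFive
-- ===== SOURCE A (Python) =====
-- def multFive(x,a=[]):
--     if x==[]:
--         return a
--     else:
--         if x[0]%5==0:
--             return multFive(x[1:],a+[x[0]])
--         else:
--             return multFive(x[1:],a)
-- ===== SOURCE B (Python) =====
-- def multFive(x, a=[]):
--     result = a
--     for e in x:
--         if e % 5 == 0:
--             result = result + [e]
--     return result
-- ===== Notes on version B (the rewrite author's own statement) =====
-- stated objective: simpler
-- what changed: Replaces recursion on the tail with a flat iterative loop over x that rebinds an accumulator list (no mutation of the default argument); no per-step x[1:] slicing.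
import Mathlib
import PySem

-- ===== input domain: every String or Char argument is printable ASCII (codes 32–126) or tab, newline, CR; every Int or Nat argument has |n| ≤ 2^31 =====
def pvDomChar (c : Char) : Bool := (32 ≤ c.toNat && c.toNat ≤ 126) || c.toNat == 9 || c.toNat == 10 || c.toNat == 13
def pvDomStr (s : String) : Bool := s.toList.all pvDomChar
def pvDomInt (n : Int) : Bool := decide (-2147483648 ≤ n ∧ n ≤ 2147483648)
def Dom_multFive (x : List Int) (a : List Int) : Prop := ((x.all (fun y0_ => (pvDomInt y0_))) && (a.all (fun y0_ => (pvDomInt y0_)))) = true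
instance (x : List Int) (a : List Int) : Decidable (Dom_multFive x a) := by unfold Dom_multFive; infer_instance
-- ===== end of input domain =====

-- ===== PORT A =====
def multFive (x : List Int) (a : List Int) : List Int :=
  match x with
  | [] => a
  | h :: t =>
    if PySem.Int.mod h 5 = 0 then multFive t (a ++ [h])
    else multFive t a

-- B: flat iterative loop (foldl) rebinding the accumulator, instead of recursion on the tail.
-- ===== PORT B =====
def multFive_alt (x : List Int) (a : List Int) : List Int :=
  x.foldl (fun result e => if PySem.Int.mod e 5 = 0 then result ++ [e] else result) a

-- ===== PRECONDITION & SPEC =====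
def Spec_multFive (x : List Int) (a : List Int) (out : List Int) : Prop := out = multFive_alt x a
instance (x : List Int) (a : List Int) (out : List Int) : Decidable (Spec_multFive x a out) := by unfold Spec_multFive; infer_instance

-- ===== CLAIM (what is proved, stated in full; the proofs are below) =====
def Claim_equal_multFive : Prop := ∀ (x : List Int) (a : List Int), Dom_multFive x a → Spec_multFive x a (multFive x a)

-- ===== LEMMAS AND PROOFS =====

-- ===== VERDICT (by name: the statement is the Claim_ definition above) =====
theorem multFive_agree (x a : List Int) : multFive x a = multFive_alt x a := by
  induction x generalizing a with
  | nil => rfl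
  | cons h t ih =>
    simp only [multFive, multFive_alt, List.foldl_cons]
    split <;> exact ih _

theorem multFive_spec : Claim_equal_multFive := by
  intro x a _
  unfold Spec_multFive
  exact multFive_agree x a
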